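-- pv_equiv track=rewrite | github.com/mihaMaks/Advent_of_code_2023 | day_12/springs2.py | check
-- ===== SOURCE A (Python) =====
-- def check(s, a):
--     j = ["".join(i) for i in s]
--     b = []
--     for el in j:
--         d = el.split(".")
--         for e in d:
--             if len(e) > 0:
--                 b.append(e)
--     if len(a) == len(b):
--         for i, k in zip(a, b):
--             if len(k) != i:
--                 return 0
--     else:
--         return 0
--     return 1
-- ===== SOURCE B (Python) =====
-- def check(s, a):
--     # Single scan with a run-length counter and a pointer into a,
--     # instead of building the list of non-empty chunks first.
--     text = ".".join("".join(g) for g in s)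
--     run = 0
--     idx = 0
--     for ch in text + ".":
--         if ch == ".":
--             if run:
--                 if idx == len(a) or run != a[idx]:
--                     return 0
--                 idx += 1
--                 run = 0
--         else:
--             run += 1
--     return 1 if idx == len(a) else 0
-- ===== Notes on version B (the rewrite author's own statement) =====
-- stated objective: alternative
-- what changed: B joins the groups with '.' separators and scans the text once, maintaining an integer run-length counter and a pointer into a, instead of A's building a list of chunk substrings via split and then zip-comparing lengths.
import Mathlib
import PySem

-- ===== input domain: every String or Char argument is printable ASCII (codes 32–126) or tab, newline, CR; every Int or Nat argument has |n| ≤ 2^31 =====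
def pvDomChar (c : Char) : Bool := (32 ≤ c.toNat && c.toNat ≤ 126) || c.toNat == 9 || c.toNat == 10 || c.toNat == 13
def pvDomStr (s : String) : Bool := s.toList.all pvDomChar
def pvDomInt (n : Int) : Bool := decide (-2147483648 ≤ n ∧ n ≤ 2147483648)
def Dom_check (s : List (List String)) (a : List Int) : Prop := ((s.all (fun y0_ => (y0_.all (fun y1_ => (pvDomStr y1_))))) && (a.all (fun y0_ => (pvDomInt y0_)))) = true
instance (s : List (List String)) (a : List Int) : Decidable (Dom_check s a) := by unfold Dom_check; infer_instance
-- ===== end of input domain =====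

-- B replaces A's "split each group into chunk substrings, then zip-compare lengths" by a single
-- character scan of the '.'-joined text maintaining a run counter and a pointer into a (alternative
-- decomposition, same cost).

-- ===== PORT A =====
-- the inner 'for i, k in zip(a, b): if len(k) != i: return 0' loop
def checkLoop : List (Int × String) → Int
  | [] => 1
  | (i, k) :: rest => if PySem.Str.len k ≠ i then 0 else checkLoop rest

def check (s : List (List String)) (a : List Int) : Int :=
  let j := s.map (fun i => PySem.Str.join "" i)
  let b := j.foldl (fun b el =>
    -- el.split(".") : separator is the non-empty literal ".", so split? is some
    let d := (PySem.Str.split? el ".").getD []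
    d.foldl (fun b e => if 0 < PySem.Str.len e then b ++ [e] else b) b) []
  if a.length = b.length then checkLoop (a.zip b) else 0

-- ===== PORT B =====
-- the 'for ch in text + "."' scan of Source B, carrying (run, idx); a[idx] is only read under idx < len(a)
def scanLoop (a : List Int) : List Char → Nat → Nat → Int
  | [], _, idx => if idx = a.length then 1 else 0
  | ch :: cs, run, idx =>
    if ch = '.' then
      if run ≠ 0 then
        if idx = a.length then 0
        else if (run : Int) ≠ a.getD idx 0 then 0
        else scanLoop a cs 0 (idx + 1)
      else scanLoop a cs run idx
    else scanLoop a cs (run + 1) idx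

def check_alt (s : List (List String)) (a : List Int) : Int :=
  let text := PySem.Str.join "." (s.map (fun g => PySem.Str.join "" g))
  scanLoop a (text.toList ++ ['.']) 0 0

-- ===== PRECONDITION & SPEC =====
def Spec_check (s : List (List String)) (a : List Int) (out : Int) : Prop := out = check_alt s a
instance (s : List (List String)) (a : List Int) (out : Int) : Decidable (Spec_check s a out) := by unfold Spec_check; infer_instance

-- ===== CLAIM (what is proved, stated in full; the proofs are below) =====
def Claim_equal_check : Prop := ∀ (s : List (List String)) (a : List Int), Dom_check s a → Spec_check s a (check s a)

-- ===== LEMMAS AND PROOFS =====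

-- proof-side: split a char list on '.' (all pieces, possibly empty)
def splitDot : List Char → List (List Char)
  | [] => [[]]
  | c :: cs =>
    if c = '.' then [] :: splitDot cs
    else match splitDot cs with
      | p :: ps => (c :: p) :: ps
      | [] => [[c]]

-- proof-side: run lengths closed by '.'s, carrying an open run
def rl : Nat → List Char → List Int
  | _, [] => []
  | run, c :: cs =>
    if c = '.' then (if run ≠ 0 then (run : Int) :: rl 0 cs else rl 0 cs)
    else rl (run + 1) cs

theorem splitDot_ne_nil (cs : List Char) : splitDot cs ≠ [] := by
  cases cs with
  | nil => simp [splitDot]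
  | cons c cs =>
    simp only [splitDot]
    split
    · simp
    · cases h : splitDot cs <;> simp

theorem rl_cons_dot (run : Nat) (cs : List Char) :
    rl run ('.' :: cs) = if run ≠ 0 then (run : Int) :: rl 0 cs else rl 0 cs := by
  simp [rl]

theorem rl_cons_ne {c : Char} (hc : c ≠ '.') (run : Nat) (cs : List Char) :
    rl run (c :: cs) = rl (run + 1) cs := by
  simp [rl, hc]

theorem go_spec (l : List Char) : ∀ (fuel : Nat) (cur : List Char) (acc : List (List Char)),
    l.length < fuel →
    PySem.Chars.splitOn.go ['.'] fuel l cur acc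
      = acc.reverse ++ ((cur.reverse ++ (splitDot l).headI) :: (splitDot l).tail) := by
  induction l with
  | nil =>
    intro fuel cur acc h
    cases fuel with
    | zero => omega
    | succ f => rw [PySem.Chars.splitOn.go.eq_def]; simp [splitDot]
  | cons c cs ih =>
    intro fuel cur acc h
    cases fuel with
    | zero => simp at h
    | succ f =>
      rw [PySem.Chars.splitOn.go.eq_def]
      simp only [List.isPrefixOf, Bool.and_true]
      by_cases hc : c = '.'
      · subst hc
        simp only [beq_self_eq_true, if_pos, List.length_cons, List.length_nil,
          List.drop_succ_cons, List.drop_zero]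
        rw [ih f [] (cur.reverse :: acc) (by simpa using h)]
        rcases hsd : splitDot cs with _ | ⟨p, ps⟩
        · exact absurd hsd (splitDot_ne_nil cs)
        · simp [splitDot, hsd]
      · have : ('.' == c) = false := by simp [Ne.symm hc]
        rw [this]
        simp only [Bool.false_eq_true, reduceIte]
        rw [ih f (c :: cur) acc (by simpa using h)]
        simp only [splitDot, if_neg hc]
        rcases hsd : splitDot cs with _ | ⟨p, ps⟩
        · exact absurd hsd (splitDot_ne_nil cs)
        · simp

theorem splitOn_dot (cs : List Char) :
    PySem.Chars.splitOn cs ['.'] = (splitDot cs).headI :: (splitDot cs).tail := by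
  have := go_spec cs (cs.length + 1) [] [] (by omega)
  simpa [PySem.Chars.splitOn] using this

theorem rl_append_dot (xs : List Char) : ∀ (ys : List Char) (run : Nat),
    rl run (xs ++ '.' :: ys) = rl run (xs ++ ['.']) ++ rl 0 ys := by
  induction xs with
  | nil => intro ys run; by_cases h : run = 0 <;> simp [rl_cons_dot, rl, h]
  | cons c cs ih =>
    intro ys run
    by_cases hc : c = '.'
    · subst hc
      show rl run ('.' :: (cs ++ '.' :: ys)) = rl run ('.' :: (cs ++ ['.'])) ++ rl 0 ys
      rw [rl_cons_dot, rl_cons_dot, ih ys 0]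
      by_cases h : run = 0 <;> simp [h]
    · show rl run (c :: (cs ++ '.' :: ys)) = rl run (c :: (cs ++ ['.'])) ++ rl 0 ys
      rw [rl_cons_ne hc, rl_cons_ne hc, ih ys (run + 1)]

theorem filterMapLen (p : List Char) (ps : List (List Char)) :
    (((p :: ps).filter (fun q => decide (0 < q.length))).map (fun q => (q.length : Int)))
      = (if p.length = 0 then [] else [(p.length : Int)])
        ++ ((ps.filter (fun q => decide (0 < q.length))).map (fun q => (q.length : Int))) := by
  rw [List.filter_cons]
  by_cases hp : p.length = 0
  · simp [hp]
  · simp [hp, Nat.pos_of_ne_zero hp]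

theorem rl_group (g : List Char) : ∀ (run : Nat),
    rl run (g ++ ['.'])
      = (if run + (splitDot g).headI.length = 0 then [] else [((run + (splitDot g).headI.length : Nat) : Int)])
        ++ ((splitDot g).tail.filter (fun q => decide (0 < q.length))).map (fun q => (q.length : Int)) := by
  induction g with
  | nil =>
    intro run
    by_cases h : run = 0 <;> simp [rl, splitDot, h]
  | cons c cs ih =>
    intro run
    by_cases hc : c = '.'
    · subst hc
      rcases hsd : splitDot cs with _ | ⟨p, ps⟩
      · exact absurd hsd (splitDot_ne_nil cs)
      have hrl : rl run ('.' :: cs ++ ['.'])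
          = (if run ≠ 0 then (run : Int) :: rl 0 (cs ++ ['.']) else rl 0 (cs ++ ['.'])) := by
        simp [rl]
      rw [hrl, ih 0, hsd]
      simp only [splitDot, reduceIte, List.headI, List.tail, Nat.zero_add, List.length_nil,
        Nat.add_zero]
      rw [hsd, filterMapLen]
      by_cases h : run = 0 <;> simp [h]
    · rcases hsd : splitDot cs with _ | ⟨p, ps⟩
      · exact absurd hsd (splitDot_ne_nil cs)
      have hrl : rl run (c :: cs ++ ['.']) = rl (run + 1) (cs ++ ['.']) := by
        simp [rl, hc]
      rw [hrl, ih (run + 1), hsd]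
      simp only [splitDot, if_neg hc, hsd, List.headI, List.tail]
      have : run + 1 + p.length = run + (c :: p).length := by simp; omega
      rw [this]

-- run = 0 corollary: rl of one closed group = lengths of its non-empty chunks
theorem rl_group_zero (g : List Char) :
    rl 0 (g ++ ['.'])
      = (((splitDot g).headI :: (splitDot g).tail).filter (fun q => decide (0 < q.length))).map
          (fun q => (q.length : Int)) := by
  rw [rl_group g 0]
  rcases hsd : splitDot g with _ | ⟨p, ps⟩
  · exact absurd hsd (splitDot_ne_nil g)
  · by_cases hp : p.length = 0 <;> simp [List.filter, hp, Nat.pos_iff_ne_zero]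

theorem rl_join (gs : List (List Char)) :
    rl 0 (PySem.Chars.join ['.'] gs ++ ['.'])
      = gs.flatMap (fun g => rl 0 (g ++ ['.'])) := by
  induction gs with
  | nil => simp [PySem.Chars.join, List.intercalate, rl]
  | cons g rest ih =>
    cases rest with
    | nil => simp [PySem.Chars.join_singleton]
    | cons q qs =>
      rw [PySem.Chars.join_cons_cons]
      have : g ++ ['.'] ++ PySem.Chars.join ['.'] (q :: qs) ++ ['.']
           = g ++ '.' :: (PySem.Chars.join ['.'] (q :: qs) ++ ['.']) := by simp
      rw [this, rl_append_dot, ih]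
      simp

theorem scan_spec (a : List Int) : ∀ (cs : List Char) (run idx : Nat), idx ≤ a.length →
    scanLoop a cs run idx = if a.drop idx = rl run cs then 1 else 0 := by
  intro cs
  induction cs with
  | nil =>
    intro run idx h
    simp only [scanLoop, rl]
    by_cases he : idx = a.length
    · simp [he]
    · rw [if_neg he, if_neg]
      intro hd
      have := congrArg List.length hd
      simp at this
      omega
  | cons c cs ih =>
    intro run idx h
    by_cases hc : c = '.'
    · subst hc
      by_cases hr : run = 0
      · subst hr
        simp only [scanLoop, reduceIte, ne_eq, not_true_eq_false, rl]
        exact ih 0 idx h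
      · simp only [scanLoop, reduceIte, ne_eq, hr, not_false_eq_true, if_pos, rl, ite_true]
        by_cases he : idx = a.length
        · rw [if_pos he, if_neg]
          intro hd
          rw [he, List.drop_length] at hd
          simp at hd
        · have hlt : idx < a.length := lt_of_le_of_ne h he
          rw [if_neg he]
          have hdrop : a.drop idx = a[idx] :: a.drop (idx + 1) :=
            List.drop_eq_getElem_cons hlt
          have hgetD : a.getD idx 0 = a[idx] := List.getD_eq_getElem a 0 hlt
          by_cases hv : (run : Int) = a[idx]
          · rw [if_neg (by rw [hgetD]; exact not_not_intro hv)]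
            rw [ih 0 (idx + 1) hlt, hdrop]
            by_cases ht : a.drop (idx + 1) = rl 0 cs
            · rw [if_pos ht, if_pos (by rw [ht, hv])]
            · rw [if_neg ht, if_neg (by intro hx; exact ht (by injection hx))]
          · rw [if_pos (by rw [hgetD]; exact hv), if_neg]
            rw [hdrop]
            intro hx
            exact hv (by injection hx with h1 _; exact h1.symm)
    · simp only [scanLoop, hc, ite_false, rl, reduceIte]
      exact ih (run + 1) idx h

theorem checkLoop_spec (a : List Int) : ∀ (b : List String),
    (if a.length = b.length then checkLoop (a.zip b) else 0)
      = if a = b.map PySem.Str.len then 1 else 0 := by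
  induction a with
  | nil =>
    intro b
    cases b with
    | nil => simp [checkLoop]
    | cons k b => simp
  | cons i a ih =>
    intro b
    cases b with
    | nil => simp
    | cons k b =>
      simp only [List.length_cons, Nat.add_right_cancel_iff, List.zip_cons_cons, checkLoop,
        List.map_cons, List.cons.injEq]
      by_cases hlen : a.length = b.length
      · rw [if_pos hlen]
        by_cases hk : PySem.Str.len k ≠ i
        · rw [if_pos hk, if_neg (by intro ⟨h1, _⟩; exact hk h1.symm)]
        · rw [if_neg hk]
          push_neg at hk
          have := ih b
          rw [if_pos hlen] at this
          rw [this]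
          by_cases ht : a = b.map PySem.Str.len
          · rw [if_pos ht, if_pos ⟨hk.symm, ht⟩]
          · rw [if_neg ht, if_neg (by intro ⟨_, h2⟩; exact ht h2)]
      · rw [if_neg hlen, if_neg]
        intro ⟨_, h2⟩
        exact hlen (by rw [h2]; simp)

-- per joined group: A's filtered split, measured by Str.len, equals the char-side chunk lengths
theorem perGroup (el : String) :
    (((PySem.Str.split? el ".").getD []).filter (fun e => decide (0 < PySem.Str.len e))).map PySem.Str.len
      = (((splitDot el.toList).headI :: (splitDot el.toList).tail).filter
          (fun q => decide (0 < q.length))).map (fun q => (q.length : Int)) := by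
  have hsplit : ((PySem.Str.split? el ".").getD []).map String.toList
      = (splitDot el.toList).headI :: (splitDot el.toList).tail := by
    have h1 := PySem.Str.split?_map el "."
    have h2 : PySem.Chars.split? el.toList ".".toList
        = some (PySem.Chars.splitOn el.toList ['.']) := by
      simp [PySem.Chars.split?]
    rw [h2] at h1
    rcases hcase : PySem.Str.split? el "." with _ | parts
    · rw [hcase] at h1
      simp at h1
    · rw [hcase] at h1
      simp only [Option.map_some, Option.some.injEq] at h1
      simp only [Option.getD_some]
      rw [h1, splitOn_dot]
  calc (((PySem.Str.split? el ".").getD []).filter (fun e => decide (0 < PySem.Str.len e))).map PySem.Str.len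
      = ((((PySem.Str.split? el ".").getD []).map String.toList).filter
          (fun q => decide (0 < q.length))).map (fun q => (q.length : Int)) := by
        rw [List.filter_map, List.map_map]
        have hp : ((fun q : List Char => decide (0 < q.length)) ∘ String.toList)
            = (fun e => decide (0 < PySem.Str.len e)) := by
          funext e; simp [PySem.Str.len]
        have hf : ((fun q : List Char => (q.length : Int)) ∘ String.toList) = PySem.Str.len := by
          funext e; simp [PySem.Str.len]
        rw [hp, hf]
    _ = (((splitDot el.toList).headI :: (splitDot el.toList).tail).filter
          (fun q => decide (0 < q.length))).map (fun q => (q.length : Int)) := by rw [hsplit]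

-- A's chunk list, on the char-list side: per group, splitDot filtered to non-empty chunks
theorem check_eq (s : List (List String)) (a : List Int) :
    check s a
      = if a = ((s.map (fun i => (PySem.Str.join "" i).toList)).flatMap
            (fun g => ((splitDot g).headI :: (splitDot g).tail).filter (fun q => decide (0 < q.length)))).map
            (fun q => (q.length : Int)) then 1 else 0 := by
  simp only [check]
  have hfold : ∀ (acc : List String),
      (s.map (fun i => PySem.Str.join "" i)).foldl (fun b el =>
        ((PySem.Str.split? el ".").getD []).foldl
          (fun b e => if 0 < PySem.Str.len e then b ++ [e] else b) b) acc
        = acc ++ (s.map (fun i => PySem.Str.join "" i)).flatMap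
            (fun el => ((PySem.Str.split? el ".").getD []).filter (fun e => decide (0 < PySem.Str.len e))) := by
    intro acc
    induction s generalizing acc with
    | nil => simp
    | cons x xs ih =>
      simp only [List.map_cons, List.foldl_cons, List.flatMap_cons, ih]
      rw [PySem.List.foldl_append_ite_eq_filter]
      simp [List.append_assoc]
  rw [hfold []]
  simp only [List.nil_append]
  rw [checkLoop_spec]
  -- move the chunk lists to the char side
  have hb : ((s.map (fun i => PySem.Str.join "" i)).flatMap
        (fun el => ((PySem.Str.split? el ".").getD []).filter (fun e => decide (0 < PySem.Str.len e)))).map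
        PySem.Str.len
      = ((s.map (fun i => (PySem.Str.join "" i).toList)).flatMap
          (fun g => ((splitDot g).headI :: (splitDot g).tail).filter (fun q => decide (0 < q.length)))).map
          (fun q => (q.length : Int)) := by
    simp only [List.map_flatMap, List.flatMap_map]
    apply List.flatMap_congr
    intro i _
    exact perGroup (PySem.Str.join "" i)
  rw [hb]

theorem check_alt_eq (s : List (List String)) (a : List Int) :
    check_alt s a
      = if a = ((s.map (fun i => (PySem.Str.join "" i).toList)).flatMap
            (fun g => ((splitDot g).headI :: (splitDot g).tail).filter (fun q => decide (0 < q.length)))).map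
            (fun q => (q.length : Int)) then 1 else 0 := by
  unfold check_alt
  rw [scan_spec a _ 0 0 (Nat.zero_le _), List.drop_zero]
  have htext : (PySem.Str.join "." (s.map (fun g => PySem.Str.join "" g))).toList
      = PySem.Chars.join ['.'] (s.map (fun g => (PySem.Str.join "" g).toList)) := by
    simp only [PySem.Str.toList_join, List.map_map, Function.comp_def]
    rfl
  rw [htext, rl_join]
  have hflat : (s.map (fun g => (PySem.Str.join "" g).toList)).flatMap (fun g => rl 0 (g ++ ['.']))
      = ((s.map (fun i => (PySem.Str.join "" i).toList)).flatMap
          (fun g => ((splitDot g).headI :: (splitDot g).tail).filter (fun q => decide (0 < q.length)))).map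
          (fun q => (q.length : Int)) := by
    simp only [List.map_flatMap, List.flatMap_map]
    apply List.flatMap_congr
    intro g _
    exact rl_group_zero _
  rw [hflat]

-- ===== VERDICT (by name: the statement is the Claim_ definition above) =====
theorem check_spec : Claim_equal_check := by
  intro s a _
  unfold Spec_check
  rw [check_eq, check_alt_eq]
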